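-- pv_equiv track=rewrite | github.com/gj-hat/Leetcode | 腾讯笔试/2. 攻与守/question3.py | solve
-- ===== SOURCE A (Python) =====
-- def score_Num(nums, n):
--     count1 = 0
--     for i in range(1, n + 1):
--         if nums[i - 1] == '0':
--             count1 += i
--     count2 = 0
--     for i in range(n + 1, len(nums) + 1):
--         if nums[i - 1] == '1':
--             count2 += i
--     return abs(count1 - count2)
--
-- def solve(sum_per, temp):
--     per_list = temp
--     # 保存结果集
--     res = []
--     for i in range(sum_per):
--         # 绝对值
--         res.append(score_Num(per_list, i))
--     if res:
--         return min(res)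
--     else:
--         return 0
-- ===== SOURCE B (Python) =====
-- def solve(sum_per, temp):
--     # Incremental: maintain weighted zero-prefix / one-suffix sums across splits
--     # instead of rescanning the whole string per split.  O(len + sum_per) time.
--     L = len(temp)
--     c1 = 0
--     c2 = sum(i + 1 for i, c in enumerate(temp) if c == '1')
--     if sum_per >= 1:
--         best = abs(c1 - c2)
--         for n in range(1, min(sum_per, L + 1)):
--             ch = temp[n - 1]
--             if ch == '0':
--                 c1 += n
--             elif ch == '1':
--                 c2 -= n
--             d = abs(c1 - c2)
--             if d < best:
--                 best = d
--         return best
--     return 0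
-- ===== Notes on version B (the rewrite author's own statement) =====
-- stated objective: faster
-- what changed: B replaces A's per-split full rescan (score_Num walks the whole string for every split point) by a single pass that updates the weighted zero-prefix and one-suffix sums incrementally while tracking the running minimum.
import Mathlib
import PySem

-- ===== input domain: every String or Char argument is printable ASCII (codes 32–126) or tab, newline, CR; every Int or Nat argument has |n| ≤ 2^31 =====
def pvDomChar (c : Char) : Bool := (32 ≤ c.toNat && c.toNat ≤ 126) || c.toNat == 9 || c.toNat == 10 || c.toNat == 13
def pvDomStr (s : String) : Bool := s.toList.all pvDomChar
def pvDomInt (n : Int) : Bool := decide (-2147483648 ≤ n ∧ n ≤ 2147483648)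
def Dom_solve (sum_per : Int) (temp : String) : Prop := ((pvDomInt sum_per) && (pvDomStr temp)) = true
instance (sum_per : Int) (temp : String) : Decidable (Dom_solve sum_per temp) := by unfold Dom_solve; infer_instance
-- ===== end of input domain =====

-- B replaces A's per-split rescan by one incremental pass over the string (asymptotically faster).

-- ===== PORT A =====
def scoreNum (nums : List Char) (n : Int) : Int :=
  let count1 := (PySem.List.pyRange 1 (n + 1) 1).foldl
    (fun acc i => if PySem.List.pyGetD nums (i - 1) ' ' = '0' then acc + i else acc) 0
  let count2 := (PySem.List.pyRange (n + 1) ((nums.length : Int) + 1) 1).foldl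
    (fun acc i => if PySem.List.pyGetD nums (i - 1) ' ' = '1' then acc + i else acc) 0
  |count1 - count2|

def solve (sum_per : Int) (temp : String) : Int :=
  let per_list := temp.toList
  let res := (PySem.List.pyRange 0 sum_per 1).foldl
    (fun r i => r ++ [scoreNum per_list i]) []
  match PySem.List.min? res (fun x => x) with
  | some m => m
  | none => 0

-- ===== PORT B =====
def solve_alt (sum_per : Int) (temp : String) : Int :=
  let cs := temp.toList
  let L : Int := cs.length
  let c1 : Int := 0
  let c2 : Int := ((PySem.List.enumerate cs 0).map
    (fun p => if p.2 = '1' then p.1 + 1 else 0)).sum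
  if 1 ≤ sum_per then
    let st := (PySem.List.pyRange 1 (min sum_per (L + 1)) 1).foldl
      (fun (st : Int × Int × Int) n =>
        let ch := PySem.List.pyGetD cs (n - 1) ' '
        let c1' := if ch = '0' then st.1 + n else st.1
        let c2' := if ch = '0' then st.2.1 else if ch = '1' then st.2.1 - n else st.2.1
        let d := |c1' - c2'|
        (c1', c2', if d < st.2.2 then d else st.2.2))
      (c1, c2, |c1 - c2|)
    st.2.2
  else 0

-- ===== PRECONDITION & SPEC =====
-- Pre_solve excludes exactly the inputs where A raises IndexError: score_Num is called
-- with split points up to sum_per - 1, and it indexes temp[n-1] for n up to the split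
-- point, so sum_per > len(temp) + 1 reads past the end of the string.
def Pre_solve (sum_per : Int) (temp : String) : Prop :=
  sum_per ≤ (temp.toList.length : Int) + 1
instance (sum_per : Int) (temp : String) : Decidable (Pre_solve sum_per temp) := by
  unfold Pre_solve; infer_instance

def pvWitness_solve : Int × String := (3, "0110")

def Spec_solve (sum_per : Int) (temp : String) (out : Int) : Prop := out = solve_alt sum_per temp
instance (sum_per : Int) (temp : String) (out : Int) : Decidable (Spec_solve sum_per temp out) := by unfold Spec_solve; infer_instance

-- ===== CLAIM (what is proved, stated in full; the proofs are below) =====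
def Claim_equal_solve : Prop := ∀ (sum_per : Int) (temp : String), Dom_solve sum_per temp → Pre_solve sum_per temp → Spec_solve sum_per temp (solve sum_per temp)

-- ===== LEMMAS AND PROOFS =====

-- weight of position j for character c (pyGetD form: out-of-range gives ' ' ≠ '0','1')
def wchar (cs : List Char) (c : Char) (j : Nat) : Int :=
  if PySem.List.pyGetD cs (j : Int) ' ' = c then (j : Int) + 1 else 0

def wsum (cs : List Char) (c : Char) (k : Nat) : Int :=
  ((List.range k).map (wchar cs c)).sum

def score (cs : List Char) (k : Nat) : Int :=
  |wsum cs '0' k - (wsum cs '1' cs.length - wsum cs '1' k)|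

lemma wsum_succ (cs : List Char) (c : Char) (k : Nat) :
    wsum cs c (k + 1) = wsum cs c k + wchar cs c k := by
  simp [wsum, List.range_succ]

lemma foldl_ite_add (c : Char) (cs : List Char) (l : List Int) :
    l.foldl (fun acc i => if PySem.List.pyGetD cs (i - 1) ' ' = c then acc + i else acc) 0
    = (l.map (fun i => if PySem.List.pyGetD cs (i - 1) ' ' = c then i else 0)).sum := by
  have h : (fun (acc i : Int) => if PySem.List.pyGetD cs (i - 1) ' ' = c then acc + i else acc)
      = (fun acc i => acc + (if PySem.List.pyGetD cs (i - 1) ' ' = c then i else 0)) := by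
    funext acc i; split <;> simp
  rw [h, PySem.List.foldl_add]; simp

lemma count_eq (c : Char) (cs : List Char) (k : Nat) :
    ((PySem.List.pyRange 1 ((k : Int) + 1) 1).map
      (fun i => if PySem.List.pyGetD cs (i - 1) ' ' = c then i else 0)).sum = wsum cs c k := by
  rw [PySem.List.pyRange_one]
  have h1 : ((k : Int) + 1 - 1).toNat = k := by omega
  rw [h1, List.map_map]
  unfold wsum
  congr 1
  apply List.map_congr_left
  intro j hj
  simp only [Function.comp_apply]
  have h2 : 1 + (j : Int) - 1 = (j : Int) := by ring
  rw [h2]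
  unfold wchar
  split <;> [ring; rfl]

lemma count2_eq (cs : List Char) (k : Nat) (hk : k ≤ cs.length) :
    ((PySem.List.pyRange ((k : Int) + 1) ((cs.length : Int) + 1) 1).map
      (fun i => if PySem.List.pyGetD cs (i - 1) ' ' = '1' then i else 0)).sum
    = wsum cs '1' cs.length - wsum cs '1' k := by
  have hsplit := PySem.List.pyRange_one_append 1 ((k : Int) + 1) ((cs.length : Int) + 1)
    (by omega) (by omega)
  have hfull := count_eq '1' cs cs.length
  have hpre := count_eq '1' cs k
  rw [hsplit, List.map_append, List.sum_append, hpre] at hfull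
  omega

lemma scoreNum_eq (cs : List Char) (k : Nat) (hk : k ≤ cs.length) :
    scoreNum cs (k : Int) = score cs k := by
  unfold scoreNum score
  rw [foldl_ite_add, foldl_ite_add, count_eq, count2_eq cs k hk]

lemma enum_sum (cs : List Char) (s : Int) :
    ((PySem.List.enumerate cs s).map (fun p => if p.2 = '1' then p.1 + 1 else 0)).sum
    = ((List.range cs.length).map
        (fun (j : Nat) => if cs[j]? = some '1' then s + (j : Int) + 1 else 0)).sum := by
  induction cs generalizing s with
  | nil => simp [PySem.List.enumerate]
  | cons x xs ih =>
    rw [PySem.List.enumerate_cons, List.map_cons, List.sum_cons, ih (s + 1)]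
    have hlen : (x :: xs).length = xs.length + 1 := rfl
    rw [hlen, List.range_succ_eq_map, List.map_cons, List.sum_cons, List.map_map]
    have hmap : (List.range xs.length).map
          ((fun (j : Nat) => if (x :: xs)[j]? = some '1' then s + (j : Int) + 1 else 0)
            ∘ Nat.succ)
        = (List.range xs.length).map
          (fun (j : Nat) => if xs[j]? = some '1' then s + 1 + (j : Int) + 1 else 0) := by
      apply List.map_congr_left
      intro j _
      simp only [Function.comp_apply, List.getElem?_cons_succ]
      split <;> [push_cast; rfl] <;> ring
    rw [hmap]
    by_cases hx : x = '1' <;> simp [hx] <;> ring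

lemma c2_init (cs : List Char) :
    ((PySem.List.enumerate cs 0).map (fun p => if p.2 = '1' then p.1 + 1 else 0)).sum
    = wsum cs '1' cs.length := by
  rw [enum_sum]
  unfold wsum
  congr 1
  apply List.map_congr_left
  intro j hj
  rw [List.mem_range] at hj
  unfold wchar
  rw [PySem.List.pyGetD_natCast, List.getD_eq_getElem?_getD, List.getElem?_eq_getElem hj]
  by_cases h : cs[j] = '1' <;> simp [h] <;> ring

lemma B_loop (cs : List Char) (k : Nat) (hk : k ≤ cs.length) :
    (PySem.List.pyRange 1 ((k : Int) + 1) 1).foldl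
      (fun (st : Int × Int × Int) n =>
        let ch := PySem.List.pyGetD cs (n - 1) ' '
        let c1' := if ch = '0' then st.1 + n else st.1
        let c2' := if ch = '0' then st.2.1 else if ch = '1' then st.2.1 - n else st.2.1
        let d := |c1' - c2'|
        (c1', c2', if d < st.2.2 then d else st.2.2))
      (0, wsum cs '1' cs.length, |(0 : Int) - wsum cs '1' cs.length|)
    = (wsum cs '0' k, wsum cs '1' cs.length - wsum cs '1' k,
       ((List.range k).map (fun j => score cs (j + 1))).foldl min (score cs 0)) := by
  induction k with
  | zero =>
    rw [show ((0 : Nat) : Int) + 1 = 1 by norm_num, PySem.List.pyRange_one_eq_nil (by omega)]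
    simp [wsum, score]
  | succ k ih =>
    have hk' : k ≤ cs.length := by omega
    have hcast : ((k + 1 : Nat) : Int) + 1 = ((k : Int) + 1) + 1 := by push_cast; ring
    rw [hcast, PySem.List.pyRange_one_succ_right (by omega), List.foldl_append, ih hk']
    simp only [List.foldl_cons, List.foldl_nil]
    have hidx : (k : Int) + 1 - 1 = (k : Int) := by ring
    rw [hidx]
    have hmins : ((List.range (k + 1)).map (fun j => score cs (j + 1))).foldl min (score cs 0)
        = min (((List.range k).map (fun j => score cs (j + 1))).foldl min (score cs 0))
            (score cs (k + 1)) := by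
      rw [List.range_succ, List.map_append, List.foldl_append]
      simp
    have h0 : (if PySem.List.pyGetD cs (k : Int) ' ' = '0'
          then wsum cs '0' k + ((k : Int) + 1) else wsum cs '0' k) = wsum cs '0' (k + 1) := by
      rw [wsum_succ]; unfold wchar; split <;> [ring; ring]
    have h1 : (if PySem.List.pyGetD cs (k : Int) ' ' = '0'
          then wsum cs '1' cs.length - wsum cs '1' k
          else if PySem.List.pyGetD cs (k : Int) ' ' = '1'
            then wsum cs '1' cs.length - wsum cs '1' k - ((k : Int) + 1)
            else wsum cs '1' cs.length - wsum cs '1' k)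
        = wsum cs '1' cs.length - wsum cs '1' (k + 1) := by
      rw [wsum_succ]; unfold wchar
      split_ifs with ha hb hc <;> simp_all <;> ring
    rw [h0, h1, hmins]
    refine Prod.ext rfl (Prod.ext rfl ?_)
    have hscore : |wsum cs '0' (k + 1) - (wsum cs '1' cs.length - wsum cs '1' (k + 1))|
        = score cs (k + 1) := rfl
    rw [hscore, min_def]
    split_ifs <;> omega

theorem solve_spec : Claim_equal_solve := by
  unfold Claim_equal_solve
  intro sum_per temp _ hpre
  unfold Spec_solve
  unfold Pre_solve at hpre
  by_cases hs : 1 ≤ sum_per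
  · obtain ⟨k, hN⟩ : ∃ k : Nat, sum_per = (k : Int) + 1 :=
      ⟨(sum_per - 1).toNat, by omega⟩
    have hk : k ≤ temp.toList.length := by omega
    subst hN
    have hA : solve ((k : Int) + 1) temp
        = ((List.range k).map (fun j => score temp.toList (j + 1))).foldl min
            (score temp.toList 0) := by
      simp only [solve]
      rw [PySem.List.foldl_append_singleton_eq_map, List.nil_append]
      have hcast : (k : Int) + 1 = ((k + 1 : Nat) : Int) := by push_cast; ring
      rw [hcast, PySem.List.pyRange_zero_natCast, List.map_map]
      have hres : (List.range (k + 1)).map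
            ((fun i => scoreNum temp.toList i) ∘ fun (j : Nat) => (j : Int))
          = (List.range (k + 1)).map (score temp.toList) := by
        apply List.map_congr_left
        intro j hj
        rw [List.mem_range] at hj
        exact scoreNum_eq temp.toList j (by omega)
      rw [hres, List.range_succ_eq_map, List.map_cons, List.map_map,
        PySem.List.min?_id_cons]
      have hcomp : (List.range k).map (score temp.toList ∘ Nat.succ)
          = (List.range k).map (fun j => score temp.toList (j + 1)) := by
        apply List.map_congr_left
        intro j _
        rfl
      rw [hcomp]
    have hB : solve_alt ((k : Int) + 1) temp
        = ((List.range k).map (fun j => score temp.toList (j + 1))).foldl min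
            (score temp.toList 0) := by
      have hloop := B_loop temp.toList k hk
      simp only [solve_alt]
      rw [if_pos (by omega : (1 : Int) ≤ (k : Int) + 1)]
      have hmin : min ((k : Int) + 1) ((temp.toList.length : Int) + 1) = (k : Int) + 1 := by
        omega
      rw [hmin, c2_init, hloop]
    rw [hA, hB]
  · have hA : solve sum_per temp = 0 := by
      simp only [solve]
      rw [PySem.List.pyRange_one_eq_nil (by omega : sum_per ≤ 0)]
      rfl
    have hB : solve_alt sum_per temp = 0 := by
      simp only [solve_alt]
      rw [if_neg hs]
    rw [hA, hB]
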